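-- pv_equiv track=rewrite | github.com/CodyJo/qa-department | scripts/test-scoring.py | compliance_overall_score
-- ===== SOURCE A (Python) =====
-- def compliance_framework_score(findings):
--     """Mirrors compliance.html computeFrameworkScore()"""
--     open_f = [f for f in findings if f.get("status") in ("open", "in-progress", None)
--               or "status" not in f]
--     if not open_f:
--         return 100
--     weights = {"critical": 25, "high": 15, "medium": 8, "low": 3, "info": 1}
--     penalty = sum(weights.get(f.get("severity", "info"), 0) for f in open_f)
--     return max(0, round(100 - penalty))
--
-- def compliance_overall_score(findings):
--     """Mirrors compliance.html computeOverallScore()"""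
--     fw_map = {"gdpr": "GDPR", "iso27001": "ISO 27001", "age-verification": "Age Verification"}
--     normalized = []
--     for f in findings:
--         nf = dict(f)
--         if "framework" not in nf and "category" in nf:
--             nf["framework"] = fw_map.get(nf["category"].lower(), nf["category"])
--         if "status" not in nf:
--             nf["status"] = "open"
--         normalized.append(nf)
--
--     gdpr = [f for f in normalized if f.get("framework") == "GDPR"]
--     iso = [f for f in normalized if f.get("framework") == "ISO 27001"]
--     age = [f for f in normalized if f.get("framework") == "Age Verification"]
--
--     s_gdpr = compliance_framework_score(gdpr)
--     s_iso = compliance_framework_score(iso)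
--     s_age = compliance_framework_score(age)
--     return round((s_gdpr + s_iso + s_age) / 3)
-- ===== SOURCE B (Python) =====
-- _FW_MAP = {"gdpr": "GDPR", "iso27001": "ISO 27001", "age-verification": "Age Verification"}
-- _WEIGHTS = {"critical": 25, "high": 15, "medium": 8, "low": 3, "info": 1}
-- _NAMES = ("GDPR", "ISO 27001", "Age Verification")
--
--
-- def compliance_overall_score(findings):
--     # Single pass: per framework keep (open-count, penalty); no dict copies, no group lists.
--     stats = {name: [0, 0] for name in _NAMES}
--     for f in findings:
--         if "framework" in f:
--             fw = f["framework"]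
--         elif "category" in f:
--             c = f["category"]
--             fw = _FW_MAP.get(c.lower(), c)
--         else:
--             fw = None
--         st = stats.get(fw)
--         if st is None:
--             continue
--         if f.get("status", "open") in ("open", "in-progress", None):
--             st[0] += 1
--             sev = f.get("severity", "info")
--             st[1] += _WEIGHTS.get(sev, 0)
--     total = sum(100 if st[0] == 0 else max(0, 100 - st[1]) for st in stats.values())
--     # round(total/3): total >= 0 and thirds are never half-way, so this is (total+1)//3.
--     return (total + 1) // 3
-- ===== Notes on version B (the rewrite author's own statement) =====
-- stated objective: alternative
-- what changed: Replaces A's normalize-copy-every-dict, build-a-normalized-list, then filter-it-three-times-and-rescan pipeline by one fold over the raw findings that accumulates an (open-count, penalty) pair per framework and derives each framework score from that pair; round((a+b+c)/3) becomes the exact integer formula (total+1)//3.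
import Mathlib
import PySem

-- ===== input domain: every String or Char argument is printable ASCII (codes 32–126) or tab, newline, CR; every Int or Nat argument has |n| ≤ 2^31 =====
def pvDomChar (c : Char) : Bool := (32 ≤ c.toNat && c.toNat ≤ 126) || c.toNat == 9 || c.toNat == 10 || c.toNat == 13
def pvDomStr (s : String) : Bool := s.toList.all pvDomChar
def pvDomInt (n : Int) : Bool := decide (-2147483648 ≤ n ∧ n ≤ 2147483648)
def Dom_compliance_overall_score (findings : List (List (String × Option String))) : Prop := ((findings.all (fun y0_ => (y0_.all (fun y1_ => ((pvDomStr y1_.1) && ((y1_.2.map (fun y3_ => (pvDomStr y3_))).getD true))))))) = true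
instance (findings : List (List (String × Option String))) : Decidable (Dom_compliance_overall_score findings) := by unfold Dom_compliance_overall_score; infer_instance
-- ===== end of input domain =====

-- B replaces A's normalize-then-filter-three-times pipeline by ONE fold that accumulates
-- an (open-count, penalty) pair per framework (objective: simpler/alternative single pass).

-- first-match association-list lookup = Python dict lookup under the assoc-list convention
def pvLk (f : List (String × Option String)) (k : String) : Option (Option String) :=
  match f with
  | [] => none
  | (k', v) :: rest => if k' == k then some v else pvLk rest k

def pvFwMap : List (String × String) :=
  [("gdpr", "GDPR"), ("iso27001", "ISO 27001"), ("age-verification", "Age Verification")]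

def pvFwLk (m : List (String × String)) (k : String) : Option String :=
  match m with
  | [] => none
  | (k', v) :: rest => if k' == k then some v else pvFwLk rest k

def pvWeights : List (String × Int) :=
  [("critical", 25), ("high", 15), ("medium", 8), ("low", 3), ("info", 1)]

def pvWLk (m : List (String × Int)) (k : String) : Option Int :=
  match m with
  | [] => none
  | (k', v) :: rest => if k' == k then some v else pvWLk rest k

-- ===== PORT A =====
-- nf = dict(f); if "framework" not in nf and "category" in nf: nf["framework"] = fw_map.get(...)
-- if "status" not in nf: nf["status"] = "open".  Inserting a NEW key into a Python dict appends it,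
-- so under first-match lookup it is an append.  (nf["category"].lower() raises AttributeError when
-- the category value is None; Pre_ excludes those inputs, the '.getD ""' there is an arbitrary totalization.)
def pvNormalize (f : List (String × Option String)) : List (String × Option String) :=
  let nf :=
    match pvLk f "framework", pvLk f "category" with
    | none, some c =>
        f ++ [("framework",
               match pvFwLk pvFwMap (PySem.Str.lower (c.getD "")) with
               | some v => some v
               | none => c)]
    | _, _ => f
  match pvLk nf "status" with
  | none => nf ++ [("status", some "open")]
  | some _ => nf

-- f.get("status") in ("open", "in-progress", None) or "status" not in f
def pvOpenA (f : List (String × Option String)) : Bool :=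
  let s := (pvLk f "status").getD none
  (s == none || s == some "open" || s == some "in-progress") || (pvLk f "status").isNone

-- weights.get(f.get("severity", "info"), 0)
def pvSevW (f : List (String × Option String)) : Int :=
  match (pvLk f "severity").getD (some "info") with
  | none => 0
  | some s => (pvWLk pvWeights s).getD 0

def compliance_framework_score_port (findings : List (List (String × Option String))) : Int :=
  let open_f := findings.filter pvOpenA
  if open_f.isEmpty then 100
  else
    let penalty := open_f.foldl (fun a f => a + pvSevW f) 0
    max 0 (100 - penalty)   -- round of an int is the int

-- round(s/3) for s ≥ 0: thirds never lie half-way from an integer (and the float rounding error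
-- cannot move them across .5), so Python's round((a+b+c)/3) equals (s+1)//3 exactly.
def pvRoundThirdA (s : Int) : Int := PySem.Int.floordiv (s + 1) 3

def compliance_overall_score (findings : List (List (String × Option String))) : Int :=
  let normalized := findings.map pvNormalize
  let gdpr := normalized.filter (fun f => (pvLk f "framework").getD none == some "GDPR")
  let iso := normalized.filter (fun f => (pvLk f "framework").getD none == some "ISO 27001")
  let age := normalized.filter (fun f => (pvLk f "framework").getD none == some "Age Verification")
  let s_gdpr := compliance_framework_score_port gdpr
  let s_iso := compliance_framework_score_port iso
  let s_age := compliance_framework_score_port age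
  pvRoundThirdA (s_gdpr + s_iso + s_age)

-- ===== PORT B =====
-- the framework value B computes for a raw finding (fw variable in Source B); None when neither key helps.
-- (on a None category value Source B raises like A; Pre_ excludes those, the 'none' there is arbitrary.)
def pvFwOf (f : List (String × Option String)) : Option String :=
  match pvLk f "framework" with
  | some v => v
  | none =>
      match pvLk f "category" with
      | some (some c) => match pvFwLk pvFwMap (PySem.Str.lower c) with
                         | some v => some v
                         | none => some c
      | some none => none
      | none => none

-- f.get("status", "open") in ("open", "in-progress", None)
def pvOpenB (f : List (String × Option String)) : Bool :=
  let s := (pvLk f "status").getD (some "open")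
  s == none || s == some "open" || s == some "in-progress"

-- Source B's stats dict {GDPR: [0,0], ISO 27001: [0,0], Age Verification: [0,0]} as a fixed triple
def pvBump (st : Int × Int) (f : List (String × Option String)) : Int × Int :=
  if pvOpenB f then (st.1 + 1, st.2 + pvSevW f) else st

def pvStep (st : (Int × Int) × (Int × Int) × (Int × Int)) (f : List (String × Option String)) :
    (Int × Int) × (Int × Int) × (Int × Int) :=
  match pvFwOf f with
  | some "GDPR" => (pvBump st.1 f, st.2.1, st.2.2)
  | some "ISO 27001" => (st.1, pvBump st.2.1 f, st.2.2)
  | some "Age Verification" => (st.1, st.2.1, pvBump st.2.2 f)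
  | _ => st

def pvScoreB (st : Int × Int) : Int := if st.1 == 0 then 100 else max 0 (100 - st.2)

def compliance_overall_score_alt (findings : List (List (String × Option String))) : Int :=
  let st := findings.foldl pvStep ((0, 0), (0, 0), (0, 0))
  let total := pvScoreB st.1 + pvScoreB st.2.1 + pvScoreB st.2.2
  PySem.Int.floordiv (total + 1) 3   -- round(total/3), see pvRoundThirdA

-- ===== PRECONDITION & SPEC =====
-- Pre_ excludes exactly the inputs where Python A raises AttributeError ('NoneType'.lower()):
-- a finding with no "framework" key whose "category" key is present with value None.  (Source B raises there too.)
def Pre_compliance_overall_score (findings : List (List (String × Option String))) : Prop :=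
  ∀ f ∈ findings, pvLk f "framework" = none → pvLk f "category" ≠ some none
instance (findings : List (List (String × Option String))) : Decidable (Pre_compliance_overall_score findings) := by unfold Pre_compliance_overall_score; infer_instance

def pvWitness_compliance_overall_score : (List (List (String × Option String))) :=
  [[("category", some "gdpr"), ("severity", some "high")], [("framework", some "GDPR"), ("status", some "closed")]]

def Spec_compliance_overall_score (findings : List (List (String × Option String))) (out : Int) : Prop := out = compliance_overall_score_alt findings
instance (findings : List (List (String × Option String))) (out : Int) : Decidable (Spec_compliance_overall_score findings out) := by unfold Spec_compliance_overall_score; infer_instance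

-- ===== CLAIM (what is proved, stated in full; the proofs are below) =====
def Claim_equal_compliance_overall_score : Prop := ∀ (findings : List (List (String × Option String))), Dom_compliance_overall_score findings → Pre_compliance_overall_score findings → Spec_compliance_overall_score findings (compliance_overall_score findings)

-- ===== LEMMAS AND PROOFS =====

theorem pvLk_append (l₁ l₂ : List (String × Option String)) (k : String) :
    pvLk (l₁ ++ l₂) k = ((pvLk l₁ k).map some).getD (pvLk l₂ k) := by
  induction l₁ with
  | nil => rfl
  | cons p rest ih =>
      obtain ⟨k', v⟩ := p
      by_cases h : (k' == k) = true <;> simp [pvLk, h, ih]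

-- the status value A's open test sees on a normalized finding equals B's defaulted value
theorem status_normalize (f : List (String × Option String)) :
    pvOpenA (pvNormalize f) = pvOpenB f := by
  unfold pvNormalize pvOpenA pvOpenB
  cases hfw : pvLk f "framework" <;> cases hc : pvLk f "category" <;>
    simp only [] <;>
    cases hs : pvLk f "status" <;>
    simp [pvLk_append, hs, pvLk]

theorem sev_normalize (f : List (String × Option String)) :
    pvSevW (pvNormalize f) = pvSevW f := by
  unfold pvNormalize pvSevW
  cases hfw : pvLk f "framework" <;> cases hc : pvLk f "category" <;>
    simp only [] <;>
    cases hs : pvLk f "status" <;>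
    simp [pvLk_append, hs, pvLk] <;>
    cases hv : pvLk f "severity" <;> simp [hv]

theorem fw_normalize (f : List (String × Option String))
    (h : pvLk f "framework" = none → pvLk f "category" ≠ some none) :
    (pvLk (pvNormalize f) "framework").getD none = pvFwOf f := by
  unfold pvNormalize pvFwOf
  cases hfw : pvLk f "framework" with
  | some v =>
      cases hc : pvLk f "category" <;>
        simp only [] <;>
        cases hs : pvLk f "status" <;>
        simp [pvLk_append, hfw, hs]
  | none =>
      cases hc : pvLk f "category" with
      | none =>
          cases hs : pvLk f "status" <;> simp [pvLk_append, hfw, hc, hs, pvLk]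
      | some c =>
          cases c with
          | none => exact absurd hc (h hfw)
          | some s =>
              simp only [hfw, hc]
              cases hs0 : pvFwLk pvFwMap (PySem.Str.lower s) <;>
                simp only [hs0, Option.getD_some] <;>
                cases hs : pvLk f "status" <;>
                  simp [pvLk_append, hs, hfw, pvLk]

-- the per-framework query both sides compute
def pvQ (name : String) (f : List (String × Option String)) : Bool :=
  (pvFwOf f == some name) && pvOpenB f

-- A's open list per framework = the map of B's selected raw findings
theorem groups_eq (fs : List (List (String × Option String)))
    (h : ∀ f ∈ fs, pvLk f "framework" = none → pvLk f "category" ≠ some none) (name : String) :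
    ((fs.map pvNormalize).filter (fun nf => (pvLk nf "framework").getD none == some name)).filter pvOpenA
      = (fs.filter (pvQ name)).map pvNormalize := by
  induction fs with
  | nil => rfl
  | cons f rest ih =>
      have hf := h f (List.mem_cons_self ..)
      have hrest := ih (fun g hg => h g (List.mem_cons_of_mem _ hg))
      have hfw := fw_normalize f hf
      have hop := status_normalize f
      simp only [List.map_cons, List.filter_cons, hfw, hop, pvQ]
      by_cases h1 : (pvFwOf f == some name) = true <;>
        by_cases h2 : pvOpenB f = true <;>
        simp [h1, h2, hrest, List.filter_cons, hop]

theorem foldl_sev_map (l : List (List (String × Option String))) (a : Int) :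
    (l.map pvNormalize).foldl (fun a f => a + pvSevW f) a = l.foldl (fun a f => a + pvSevW f) a := by
  induction l generalizing a with
  | nil => rfl
  | cons f rest ih => simp [List.foldl_cons, sev_normalize, ih]

-- A's framework score on a group equals B's score of (count, penalty) over the selected raw findings
theorem score_eq (fs : List (List (String × Option String)))
    (h : ∀ f ∈ fs, pvLk f "framework" = none → pvLk f "category" ≠ some none) (name : String) :
    compliance_framework_score_port
        ((fs.map pvNormalize).filter (fun nf => (pvLk nf "framework").getD none == some name))
      = pvScoreB (((fs.filter (pvQ name)).length : Int),
                  (fs.filter (pvQ name)).foldl (fun a f => a + pvSevW f) 0) := by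
  unfold compliance_framework_score_port pvScoreB
  rw [groups_eq fs h name]
  rcases hE : fs.filter (pvQ name) with _ | ⟨g, gs⟩
  · simp
  · simp only [hE, List.map_cons, List.isEmpty_cons, List.foldl_cons, sev_normalize,
               foldl_sev_map]
    have h0 : (((g :: gs).length : Int) == 0) = false := by
      simp only [List.length_cons, beq_eq_false_iff_ne, ne_eq]
      push_cast
      omega
    simp only [h0, Bool.false_eq_true, if_false]

-- the fold computes exactly those (count, penalty) pairs
theorem fold_eq (fs : List (List (String × Option String)))
    (st : (Int × Int) × (Int × Int) × (Int × Int)) :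
    fs.foldl pvStep st =
      ((st.1.1 + ((fs.filter (pvQ "GDPR")).length : Int),
        (fs.filter (pvQ "GDPR")).foldl (fun a f => a + pvSevW f) st.1.2),
       (st.2.1.1 + ((fs.filter (pvQ "ISO 27001")).length : Int),
        (fs.filter (pvQ "ISO 27001")).foldl (fun a f => a + pvSevW f) st.2.1.2),
       (st.2.2.1 + ((fs.filter (pvQ "Age Verification")).length : Int),
        (fs.filter (pvQ "Age Verification")).foldl (fun a f => a + pvSevW f) st.2.2.2)) := by
  induction fs generalizing st with
  | nil => simp
  | cons f rest ih =>
      simp only [List.foldl_cons, List.filter_cons, ih]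
      unfold pvStep pvQ pvBump
      rcases hfw : pvFwOf f with _ | v
      · simp [hfw]
      · by_cases h2 : pvOpenB f = true <;>
          by_cases hg : v = "GDPR" <;>
          by_cases hi : v = "ISO 27001" <;>
          by_cases ha : v = "Age Verification" <;>
          simp_all [List.foldl_cons, pvBump, Prod.ext_iff] <;>
          omega

-- ===== VERDICT (by name: the statement is the Claim_ definition above) =====
theorem compliance_overall_score_spec : Claim_equal_compliance_overall_score := by
  intro findings _hdom hpre
  unfold Spec_compliance_overall_score compliance_overall_score compliance_overall_score_alt
  simp only [fold_eq, pvRoundThirdA]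
  rw [score_eq findings hpre "GDPR", score_eq findings hpre "ISO 27001",
      score_eq findings hpre "Age Verification"]
  simp
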